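-- pv_equiv track=rewrite | github.com/Divyam1000/collagestuff | SEM 3/python/week 8/assignment2.py | replaceV
-- ===== SOURCE A (Python) =====
-- def replaceV(S):
--     vowels = "aeiouAEIOU"
--     result = []
--     count = 0
--
--     for char in S:
--         if char in vowels:
--             count += 1
--             if count == 3:
--                 l =len(result)
--                 del(result[l-1])
--                 del(result[l-2])
--                 result.append('_')
--                 count = 0
--             else:
--                result.append(char)
--         else:
--             count = 0
--             result.append(char)
--     return ''.join(result)
-- ===== SOURCE B (Python) =====
-- def replaceV(S):
--     V = set("aeiouAEIOU")
--     out = []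
--     i, n = 0, len(S)
--     while i < n:
--         if i + 3 <= n and S[i] in V and S[i + 1] in V and S[i + 2] in V:
--             out.append('_')
--             i += 3
--         else:
--             out.append(S[i])
--             i += 1
--     return ''.join(out)
-- ===== Notes on version B (the rewrite author's own statement) =====
-- stated objective: simpler
-- what changed: B replaces A's counter-plus-list-deletion loop (append vowels, then delete the last two when the counter hits 3) with a single lookahead scan that tests whether the next three characters are all vowels and emits either the replacement character or one input character directly, never mutating what was already produced.
import Mathlib
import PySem

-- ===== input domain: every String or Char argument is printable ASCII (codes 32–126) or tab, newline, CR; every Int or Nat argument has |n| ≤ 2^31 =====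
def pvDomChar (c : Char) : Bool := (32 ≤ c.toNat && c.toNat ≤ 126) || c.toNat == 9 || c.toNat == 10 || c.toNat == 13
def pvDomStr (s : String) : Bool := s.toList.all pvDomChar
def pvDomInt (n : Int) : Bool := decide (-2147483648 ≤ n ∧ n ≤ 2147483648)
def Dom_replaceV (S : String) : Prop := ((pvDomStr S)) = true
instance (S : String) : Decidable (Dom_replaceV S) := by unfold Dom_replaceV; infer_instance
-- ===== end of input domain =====

-- B re-implements A with a three-character lookahead scan instead of a counter with in-place deletion; simpler, same cost.

-- ===== PORT A =====
-- 'char in vowels' with vowels = "aeiouAEIOU"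
def isVow (c : Char) : Bool := ("aeiouAEIOU".toList).contains c

-- loop body of A: state = (result, count); 'del result[l-1]; del result[l-2]' as two eraseIdx
def stepA (st : List Char × Int) (c : Char) : List Char × Int :=
  if isVow c then
    let count := st.2 + 1
    if count == 3 then
      let l := st.1.length
      (((st.1.eraseIdx (l - 1)).eraseIdx (l - 2)) ++ ['_'], 0)
    else (st.1 ++ [c], count)
  else (st.1 ++ [c], 0)

def replaceV (S : String) : String :=
  String.mk (S.toList.foldl stepA ([], 0)).1

-- ===== PORT B =====
-- the while loop of Source B: emit '_' and skip 3 when the next three chars are vowels, else emit one char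
def goB : List Char → List Char
  | [] => []
  | [a] => [a]
  | [a, b] => [a, b]
  | a :: b :: c :: rest =>
    if isVow a && isVow b && isVow c then '_' :: goB rest
    else a :: goB (b :: c :: rest)

def replaceV_alt (S : String) : String := String.mk (goB S.toList)

-- ===== PRECONDITION & SPEC =====
def Spec_replaceV (S : String) (out : String) : Prop := out = replaceV_alt S
instance (S : String) (out : String) : Decidable (Spec_replaceV S out) := by unfold Spec_replaceV; infer_instance

-- ===== CLAIM (what is proved, stated in full; the proofs are below) =====
def Claim_equal_replaceV : Prop := ∀ (S : String), Dom_replaceV S → Spec_replaceV S (replaceV S)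

-- ===== LEMMAS AND PROOFS =====

-- goB copies a leading non-vowel
theorem goB_cons_nonvow (c : Char) (L : List Char) (hc : isVow c = false) :
    goB (c :: L) = c :: goB L := by
  match L with
  | [] => simp [goB]
  | [a] => simp [goB]
  | a :: b :: L' => simp [goB, hc]

-- goB copies a vowel followed by a non-vowel
theorem goB_cons2_nonvow (a c : Char) (L : List Char) (hc : isVow c = false) :
    goB (a :: c :: L) = a :: c :: goB L := by
  match L with
  | [] => simp [goB]
  | x :: L' => simp [goB, hc, goB_cons_nonvow c (x :: L') hc]

theorem eraseIdx_append_last (xs : List Char) (x : Char) :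
    (xs ++ [x]).eraseIdx xs.length = xs := by
  induction xs with
  | nil => simp
  | cons y ys ih => simp [ih]

theorem erase_two (res : List Char) (a b : Char) :
    ((res ++ [a, b]).eraseIdx (res.length + 1)).eraseIdx res.length = res := by
  have h1 : (res ++ [a, b]).eraseIdx (res.length + 1) = res ++ [a] := by
    rw [show res ++ [a, b] = (res ++ [a]) ++ [b] by simp,
       show res.length + 1 = (res ++ [a]).length by simp, eraseIdx_append_last]
  rw [h1, eraseIdx_append_last]

-- main invariant: A's fold with pending vowel run p equals res ++ goB (p ++ L)
theorem foldA_inv (L : List Char) : ∀ (res p : List Char),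
    (∀ x ∈ p, isVow x = true) → p.length ≤ 2 →
    (L.foldl stepA (res ++ p, (p.length : Int))).1 = res ++ goB (p ++ L) := by
  induction L with
  | nil =>
    intro res p hp hlen
    match p, hlen with
    | [], _ => simp [goB]
    | [a], _ => simp [goB]
    | [a, b], _ => simp [goB]
  | cons c L' ih =>
    intro res p hp hlen
    by_cases hc : isVow c = true
    · match p, hlen with
      | [], _ =>
        have hstep : stepA (res, 0) c = (res ++ [c], 1) := by
          simp [stepA, hc]
        have := ih res [c] (by intro x hx; simp at hx; subst hx; exact hc) (by simp)
        simpa [hstep] using this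
      | [a], _ =>
        have ha : isVow a = true := hp a (by simp)
        have hstep : stepA (res ++ [a], 1) c = (res ++ [a, c], 2) := by
          simp [stepA, hc]
        have hmem : ∀ x ∈ [a, c], isVow x = true := by
          intro x hx; simp at hx
          rcases hx with h | h
          · subst h; exact ha
          · subst h; exact hc
        have := ih res [a, c] hmem (by simp)
        simpa [hstep] using this
      | [a, b], _ =>
        have ha : isVow a = true := hp a (by simp)
        have hb : isVow b = true := hp b (by simp)
        have hstep : stepA (res ++ [a, b], 2) c = (res ++ ['_'], 0) := by
          simp only [stepA, hc, if_true]
          norm_num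
          exact erase_two res a b
        have := ih (res ++ ['_']) [] (by simp) (by simp)
        have hgo : goB (a :: b :: c :: L') = '_' :: goB L' := by
          simp [goB, ha, hb, hc]
        simpa [hstep, hgo] using this
    · have hc' : isVow c = false := by simpa using hc
      match p, hlen with
      | [], _ =>
        have hstep : stepA (res, 0) c = (res ++ [c], 0) := by simp [stepA, hc']
        have := ih (res ++ [c]) [] (by simp) (by simp)
        simpa [hstep, goB_cons_nonvow c L' hc'] using this
      | [a], _ =>
        have hstep : stepA (res ++ [a], 1) c = (res ++ [a, c], 0) := by simp [stepA, hc']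
        have := ih (res ++ [a, c]) [] (by simp) (by simp)
        simpa [hstep, goB_cons2_nonvow a c L' hc'] using this
      | [a, b], _ =>
        have hstep : stepA (res ++ [a, b], 2) c = (res ++ [a, b, c], 0) := by simp [stepA, hc']
        have := ih (res ++ [a, b, c]) [] (by simp) (by simp)
        have hgo : goB (a :: b :: c :: L') = a :: b :: c :: goB L' := by
          simp [goB, hc', goB_cons2_nonvow b c L' hc']
        simpa [hstep, hgo] using this

-- ===== VERDICT (by name: the statement is the Claim_ definition above) =====
theorem replaceV_spec : Claim_equal_replaceV := by
  intro S _
  unfold Spec_replaceV replaceV replaceV_alt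
  exact congrArg String.mk (by simpa using foldA_inv S.toList [] [] (by simp) (by simp))
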